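-- pv_equiv track=rewrite | github.com/generalaimodels/DSA-Mastery | dsa/recursion1.py | deep_recursive_function
-- ===== SOURCE A (Python) =====
-- def deep_recursive_function(depth: int) -> str:
--     """
--     A demonstration of a deep recursive function that builds a string based on recursion depth.
--
--     Parameters:
--     -----------
--     depth : int
--         The depth of recursion.
--
--     Returns:
--     --------
--     str
--         A string representing the recursion path.
--
--     Raises:
--     -------
--     ValueError
--         If depth is negative.
--     TypeError
--         If depth is not an integer.
--     """
--     if not isinstance(depth, int):
--         raise TypeError(f"Expected integer for depth, got {type(depth).__name__} instead.")
--     if depth < 0: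
--         raise ValueError("Depth cannot be negative.")
--
--     if depth == 0:
--         return "Base case reached."
--     return f"Recursion depth {depth} -> " + deep_recursive_function(depth - 1)
-- ===== SOURCE B (Python) =====
-- def deep_recursive_function(depth: int) -> str:
--     if not isinstance(depth, int):
--         raise TypeError(f"Expected integer for depth, got {type(depth).__name__} instead.")
--     if depth < 0:
--         raise ValueError("Depth cannot be negative.")
--     parts = [f"Recursion depth {d} -> " for d in range(depth, 0, -1)]
--     parts.append("Base case reached.")
--     return ''.join(parts)
-- ===== Notes on version B (the rewrite author's own statement) =====
-- stated objective: faster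
-- what changed: Replaced the recursive step-by-step string concatenation with an iterative list comprehension over a descending range joined once with ''.join.
import Mathlib
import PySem

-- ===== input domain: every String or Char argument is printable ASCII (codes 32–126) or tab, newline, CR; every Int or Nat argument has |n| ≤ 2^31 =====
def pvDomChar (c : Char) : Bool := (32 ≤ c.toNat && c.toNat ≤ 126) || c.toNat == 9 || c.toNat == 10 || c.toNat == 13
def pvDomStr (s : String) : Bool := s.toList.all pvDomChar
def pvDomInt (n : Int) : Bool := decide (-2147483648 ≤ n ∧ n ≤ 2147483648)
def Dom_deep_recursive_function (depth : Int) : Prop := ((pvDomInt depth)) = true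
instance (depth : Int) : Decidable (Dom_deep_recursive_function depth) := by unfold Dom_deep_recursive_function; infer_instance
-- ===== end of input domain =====

-- B replaces A's recursive step-by-step string concatenation by one iterative join over a descending range.

-- ===== PORT A =====
-- the 'depth < 0' branch is where Python raises ValueError (excluded by Pre_); it also makes the recursion total
def deep_recursive_function (depth : Int) : String :=
  if depth < 0 then ""
  else if depth = 0 then "Base case reached."
  else "Recursion depth " ++ PySem.Int.toStr depth ++ " -> " ++ deep_recursive_function (depth - 1)
termination_by depth.toNat
decreasing_by omega

-- ===== PORT B =====
def deep_recursive_function_alt (depth : Int) : String :=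
  String.join
    (((PySem.List.pyRange depth 0 (-1)).map
        (fun d => "Recursion depth " ++ PySem.Int.toStr d ++ " -> "))
      ++ ["Base case reached."])

-- ===== PRECONDITION & SPEC =====
-- Python A raises ValueError for negative depth (and TypeError for non-int, outside the type convention)
def Pre_deep_recursive_function (depth : Int) : Prop := 0 ≤ depth
instance (depth : Int) : Decidable (Pre_deep_recursive_function depth) := by unfold Pre_deep_recursive_function; infer_instance
def pvWitness_deep_recursive_function : Int := (3)
def Spec_deep_recursive_function (depth : Int) (out : String) : Prop := out = deep_recursive_function_alt depth
instance (depth : Int) (out : String) : Decidable (Spec_deep_recursive_function depth out) := by unfold Spec_deep_recursive_function; infer_instance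

-- ===== CLAIM (what is proved, stated in full; the proofs are below) =====
def Claim_equal_deep_recursive_function : Prop := ∀ (depth : Int), Dom_deep_recursive_function depth → Pre_deep_recursive_function depth → Spec_deep_recursive_function depth (deep_recursive_function depth)

-- ===== LEMMAS AND PROOFS =====

theorem foldl_append_str (l : List String) (a : String) :
    List.foldl (fun r s => r ++ s) a l = a ++ List.foldl (fun r s => r ++ s) "" l := by
  induction l generalizing a with
  | nil => simp
  | cons x xs ih => simp only [List.foldl_cons]; rw [ih (a ++ x), ih ("" ++ x), String.append_assoc]; simp

theorem join_cons_str (x : String) (l : List String) :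
    String.join (x :: l) = x ++ String.join l := by
  simp only [String.join, List.foldl_cons]
  rw [foldl_append_str l ("" ++ x)]
  simp [String.join]

theorem deep_eq_alt_nat (n : Nat) : deep_recursive_function (n : Int) = deep_recursive_function_alt (n : Int) := by
  induction n with
  | zero =>
    simp only [Nat.cast_zero]
    rw [deep_recursive_function]
    unfold deep_recursive_function_alt
    rw [PySem.List.pyRange_neg_one_eq_nil (le_refl 0)]
    simp [String.join]
  | succ k ih =>
    rw [deep_recursive_function]
    have h0 : ¬ ((k + 1 : Nat) : Int) < 0 := by omega
    have h1 : ¬ ((k + 1 : Nat) : Int) = 0 := by omega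
    have hc : (0 : Int) < ((k + 1 : Nat) : Int) := by omega
    simp only [h0, h1, if_false]
    have hstep : ((k + 1 : Nat) : Int) - 1 = (k : Int) := by omega
    rw [hstep, ih]
    unfold deep_recursive_function_alt
    rw [PySem.List.pyRange_neg_one_cons hc, hstep]
    rw [List.map_cons, List.cons_append, join_cons_str]

-- ===== VERDICT (by name: the statement is the Claim_ definition above) =====
theorem deep_recursive_function_spec : Claim_equal_deep_recursive_function := by
  intro depth _ hpre
  have h : depth = (depth.toNat : Int) := by
    unfold Pre_deep_recursive_function at hpre; omega
  show deep_recursive_function depth = deep_recursive_function_alt depth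
  rw [h]; exact deep_eq_alt_nat depth.toNat
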